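-- pv_equiv track=rewrite | github.com/MichalDrosio/python-podstawy | CodersWars/upside_down_numbers.py | is_upside_down
-- ===== SOURCE A (Python) =====
-- def is_upside_down(n):
--     flipped = {
--         "0": "0",
--         "1": "1",
--         "6": "9",
--         "8": "8",
--         "9": "6",
--     }
--     nstr = str(n)
--     last = len(nstr) - 1
--     return all(nstr[i] in flipped and flipped[nstr[i]] == nstr[last - i] for i in range(len(nstr)))
-- ===== SOURCE B (Python) =====
-- def is_upside_down(n):
--     # Pure-arithmetic rotation: no string conversion at all.
--     if n < 0:
--         return False
--     flip = {0: 0, 1: 1, 6: 9, 8: 8, 9: 6}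
--     m, r = n, 0
--     while m:
--         d = m % 10
--         if d not in flip:
--             return False
--         r = r * 10 + flip[d]
--         m //= 10
--     return r == n
-- ===== Notes on version B (the rewrite author's own statement) =====
-- stated objective: alternative
-- what changed: Replaces A's string-index symmetry scan with a pure-arithmetic algorithm: reject negatives, then peel decimal digits with modulus and integer division, building the rotated number numerically and comparing it to n, with no string conversion at all.
import Mathlib
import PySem

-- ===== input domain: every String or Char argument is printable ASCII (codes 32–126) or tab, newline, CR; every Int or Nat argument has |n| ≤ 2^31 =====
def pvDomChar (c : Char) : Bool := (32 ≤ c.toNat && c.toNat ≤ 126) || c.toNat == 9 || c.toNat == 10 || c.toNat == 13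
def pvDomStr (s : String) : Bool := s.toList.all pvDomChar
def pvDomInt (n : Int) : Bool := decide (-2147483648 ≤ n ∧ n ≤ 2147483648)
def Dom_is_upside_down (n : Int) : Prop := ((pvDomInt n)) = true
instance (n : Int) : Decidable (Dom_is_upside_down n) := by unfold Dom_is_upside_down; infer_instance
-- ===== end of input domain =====

-- B replaces A's string-index symmetry scan by a pure-arithmetic algorithm (no string at all):
-- reject negatives, peel digits with % 10 and // 10 building the rotated number, compare it to n.


-- ===== PORT A =====
-- lookup in A's literal 5-entry dict `flipped`, ported as an if-chain (exact)
def pvFlip (c : Char) : Option Char :=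
  if c = '0' then some '0'
  else if c = '1' then some '1'
  else if c = '6' then some '9'
  else if c = '8' then some '8'
  else if c = '9' then some '6'
  else none

-- A: all(nstr[i] in flipped and flipped[nstr[i]] == nstr[last-i] for i in range(len(nstr)))
-- (indices i and last-i are always in range, so List.getD with a dummy default is exact)
def is_upside_down (n : Int) : Bool :=
  let s := (PySem.Int.toStr n).toList
  let last := s.length - 1
  (List.range s.length).all (fun i =>
    match pvFlip (s.getD i ' ') with
    | some f => f == s.getD (last - i) ' '
    | none => false)

-- ===== PORT B =====
-- B's dict `flip` over Nat digit values, as an if-chain (exact)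
def pvFlipD (d : Nat) : Option Nat :=
  if d = 0 then some 0
  else if d = 1 then some 1
  else if d = 6 then some 9
  else if d = 8 then some 8
  else if d = 9 then some 6
  else none

-- B's while-loop: peel digits of m, accumulate the rotated value in r; none = early `return False`
def pvAltLoop (m r : Nat) : Option Nat :=
  if h : m = 0 then some r
  else
    match pvFlipD (m % 10) with
    | none => none
    | some f => pvAltLoop (m / 10) (r * 10 + f)
termination_by m
decreasing_by exact Nat.div_lt_self (Nat.pos_of_ne_zero h) (by omega)

def is_upside_down_alt (n : Int) : Bool :=
  if n < 0 then false
  else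
    match pvAltLoop n.toNat 0 with
    | none => false
    | some r => r == n.toNat

-- ===== PRECONDITION & SPEC =====
def Spec_is_upside_down (n : Int) (out : Bool) : Prop := out = is_upside_down_alt n
instance (n : Int) (out : Bool) : Decidable (Spec_is_upside_down n out) := by unfold Spec_is_upside_down; infer_instance

-- ===== CLAIM (what is proved, stated in full; the proofs are below) =====
def Claim_equal_is_upside_down : Prop := ∀ (n : Int), Dom_is_upside_down n → Spec_is_upside_down n (is_upside_down n)

-- ===== LEMMAS AND PROOFS =====

-- total flip on digit values
def pvF (d : Nat) : Nat := (pvFlipD d).getD d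

lemma pvFlip_invol (c d : Char) (h : pvFlip c = some d) : pvFlip d = some c := by
  unfold pvFlip at h ⊢
  split_ifs at h <;> (cases h; subst_vars; decide)

-- A's index scan equals: all chars flippable AND the flipped reversal equals the string
lemma pv_A_char (s : List Char) :
    ((List.range s.length).all (fun i =>
      match pvFlip (s.getD i ' ') with
      | some f => f == s.getD (s.length - 1 - i) ' '
      | none => false))
    = (if s.all (fun c => (pvFlip c).isSome)
       then (s.reverse.map (fun c => (pvFlip c).getD c) == s : Bool)
       else false) := by
  rw [Bool.eq_iff_iff]
  simp only [List.all_eq_true, List.mem_range]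
  constructor
  · intro h
    have hsome : ∀ c ∈ s, (pvFlip c).isSome = true := by
      intro c hc
      obtain ⟨i, hi, rfl⟩ := List.mem_iff_getElem.mp hc
      have hhi := h i hi
      rw [List.getD_eq_getElem s ' ' hi] at hhi
      cases hf : pvFlip s[i] with
      | none => simp [hf] at hhi
      | some f => simp
    rw [if_pos hsome, beq_iff_eq]
    apply List.ext_getElem
    · simp
    · intro i h1 h2
      have hi : i < s.length := h2
      have hrl : s.length - 1 - i < s.length := by omega
      have hh := h (s.length - 1 - i) hrl
      have hidx : s.length - 1 - (s.length - 1 - i) = i := by omega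
      rw [List.getD_eq_getElem s ' ' hrl,
          List.getD_eq_getElem s ' ' (by omega : s.length - 1 - (s.length - 1 - i) < s.length)] at hh
      simp only [hidx] at hh
      simp only [List.getElem_map, List.getElem_reverse]
      cases hf : pvFlip s[s.length - 1 - i] with
      | none => simp [hf] at hh
      | some f =>
        rw [hf, beq_iff_eq] at hh
        simpa using hh
  · intro h i hi
    by_cases hall : ∀ c ∈ s, (pvFlip c).isSome = true
    · rw [if_pos hall, beq_iff_eq] at h
      have hr : s.length - 1 - i < s.length := by omega
      obtain ⟨f, hf⟩ := Option.isSome_iff_exists.mp (hall s[i] (List.getElem_mem hi))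
      obtain ⟨g, hg⟩ := Option.isSome_iff_exists.mp (hall s[s.length - 1 - i] (List.getElem_mem hr))
      have hcomp : (List.map (fun c => (pvFlip c).getD c) s.reverse).getD i ' ' = s.getD i ' ' := by
        rw [h]
      rw [List.getD_eq_getElem _ ' ' (by simpa using hi), List.getD_eq_getElem s ' ' hi] at hcomp
      simp only [List.getElem_map, List.getElem_reverse, hg,
        Option.getD_some] at hcomp
      have hback : pvFlip s[i] = some s[s.length - 1 - i] := by
        rw [← hcomp]; exact pvFlip_invol _ _ hg
      rw [List.getD_eq_getElem s ' ' hi, hback, List.getD_eq_getElem s ' ' hr]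
      simp
    · rw [if_neg hall] at h
      exact absurd h (by simp)

-- bridges between the char table and the digit table, on actual digits d < 10
lemma pv_bridge_some (d : Nat) (hd : d < 10) :
    (pvFlip (Nat.digitChar d)).isSome = (pvFlipD d).isSome := by
  interval_cases d <;> decide

lemma pv_bridge_val (d : Nat) (hd : d < 10) :
    (pvFlip (Nat.digitChar d)).getD (Nat.digitChar d) = Nat.digitChar (pvF d) := by
  interval_cases d <;> decide

lemma pvF_lt (d : Nat) (hd : d < 10) : pvF d < 10 := by
  interval_cases d <;> decide

lemma digitChar_inj (d e : Nat) (hd : d < 10) (he : e < 10)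
    (h : Nat.digitChar d = Nat.digitChar e) : d = e := by
  interval_cases d <;> interval_cases e <;> first | rfl | (exfalso; exact absurd h (by decide))

lemma map_digitChar_inj (l1 l2 : List Nat) (h1 : ∀ d ∈ l1, d < 10) (h2 : ∀ d ∈ l2, d < 10)
    (h : l1.map Nat.digitChar = l2.map Nat.digitChar) : l1 = l2 := by
  induction l1 generalizing l2 with
  | nil => cases l2 <;> simp_all
  | cons a l ih =>
    cases l2 with
    | nil => simp_all
    | cons b l' =>
      simp only [List.map_cons, List.cons.injEq] at h
      have := digitChar_inj a b (h1 a (by simp)) (h2 b (by simp)) h.1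
      subst this
      exact congrArg _ (ih l' (fun d hd => h1 d (List.mem_cons_of_mem _ hd))
        (fun d hd => h2 d (List.mem_cons_of_mem _ hd)) h.2)

lemma ofDigits_inj (l1 l2 : List Nat) (hlen : l1.length = l2.length)
    (h1 : ∀ d ∈ l1, d < 10) (h2 : ∀ d ∈ l2, d < 10)
    (h : Nat.ofDigits 10 l1 = Nat.ofDigits 10 l2) : l1 = l2 := by
  induction l1 generalizing l2 with
  | nil => cases l2 <;> simp_all
  | cons a l ih =>
    cases l2 with
    | nil => simp_all
    | cons b l' =>
      simp only [Nat.ofDigits_cons] at h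
      have ha := h1 a (by simp)
      have hb := h2 b (by simp)
      have hab : a = b ∧ Nat.ofDigits 10 l = Nat.ofDigits 10 l' := by
        constructor <;> omega
      obtain ⟨rfl, hrest⟩ := hab
      simp only [List.cons.injEq, true_and]
      exact ih l' (by simpa using hlen) (fun d hd => h1 d (List.mem_cons_of_mem _ hd))
        (fun d hd => h2 d (List.mem_cons_of_mem _ hd)) hrest

-- toDigits in terms of the lsf digit list
lemma toDigits_eq_digits (m : Nat) (h : 0 < m) :
    Nat.toDigits 10 m = ((Nat.digits 10 m).map Nat.digitChar).reverse := by
  induction m using Nat.strong_induction_on with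
  | _ m ih =>
    rw [Nat.toDigits_eq_if (by norm_num), Nat.digits_def' (by norm_num) h]
    by_cases hm : m < 10
    · have hdiv : m / 10 = 0 := Nat.div_eq_of_lt hm
      simp [hm, hdiv, Nat.mod_eq_of_lt hm]
    · have h10 : 0 < m / 10 := Nat.div_pos (le_of_not_gt hm) (by norm_num)
      rw [if_neg hm, ih (m / 10) (Nat.div_lt_self h (by norm_num)) h10,
        Nat.digits_def' (by norm_num) h10]
      simp

-- B's loop over the lsf digit list
lemma pvAltLoop_eq (m : Nat) : ∀ r, pvAltLoop m r =
    (if (Nat.digits 10 m).all (fun d => (pvFlipD d).isSome)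
     then some ((Nat.digits 10 m).foldl (fun a d => a * 10 + pvF d) r) else none) := by
  induction m using Nat.strong_induction_on with
  | _ m ih =>
    intro r
    by_cases h0 : m = 0
    · subst h0; simp [pvAltLoop]
    · rw [pvAltLoop, dif_neg h0, Nat.digits_def' (by norm_num) (Nat.pos_of_ne_zero h0)]
      cases hf : pvFlipD (m % 10) with
      | none => simp [hf]
      | some f =>
        have hred : (match some f with
            | none => none
            | some f => pvAltLoop (m / 10) (r * 10 + f)) = pvAltLoop (m / 10) (r * 10 + f) := rfl
        rw [hred, ih (m / 10) (Nat.div_lt_self (Nat.pos_of_ne_zero h0) (by norm_num)) (r * 10 + f)]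
        simp [hf, pvF]

-- value of the accumulating fold
lemma foldl_eq_ofDigits (l : List Nat) : ∀ r,
    l.foldl (fun a d => a * 10 + pvF d) r
      = r * 10 ^ l.length + Nat.ofDigits 10 (l.map pvF).reverse := by
  induction l with
  | nil => simp
  | cons d l ih =>
    intro r
    rw [List.foldl_cons, ih (r * 10 + pvF d)]
    simp only [List.map_cons, List.reverse_cons, Nat.ofDigits_append, List.length_cons,
      List.length_reverse, List.length_map, Nat.ofDigits_cons, Nat.ofDigits_nil]
    push_cast
    ring

-- main: A's characterization equals B on a positive value
lemma pv_main_pos (m : Nat) (_hm : 0 < m) :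
    (let s := ((Nat.digits 10 m).map Nat.digitChar).reverse
     if s.all (fun c => (pvFlip c).isSome)
     then (s.reverse.map (fun c => (pvFlip c).getD c) == s : Bool)
     else false)
    = (match pvAltLoop m 0 with
       | none => false
       | some r => (r == m : Bool)) := by
  have hdig : ∀ d ∈ Nat.digits 10 m, d < 10 := fun d hd => Nat.digits_lt_base (by norm_num) hd
  have hall : ((((Nat.digits 10 m).map Nat.digitChar).reverse).all (fun c => (pvFlip c).isSome))
      = ((Nat.digits 10 m).all (fun d => (pvFlipD d).isSome)) := by
    rw [Bool.eq_iff_iff]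
    simp only [List.all_eq_true, List.mem_reverse, List.mem_map]
    constructor
    · intro h d hd
      rw [← pv_bridge_some d (hdig d hd)]
      exact h _ ⟨d, hd, rfl⟩
    · rintro h c ⟨d, hd, rfl⟩
      rw [pv_bridge_some d (hdig d hd)]
      exact h d hd
  rw [pvAltLoop_eq m 0]
  by_cases hf : ((Nat.digits 10 m).all (fun d => (pvFlipD d).isSome)) = true
  · rw [if_pos hf]
    show (if _ then _ else false) = ((List.foldl (fun a d => a * 10 + pvF d) 0 (Nat.digits 10 m) == m : Bool))
    rw [if_pos (by rw [hall]; exact hf), foldl_eq_ofDigits]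
    have hmap : ((((Nat.digits 10 m).map Nat.digitChar).reverse).reverse).map
          (fun c => (pvFlip c).getD c)
        = ((Nat.digits 10 m).map pvF).map Nat.digitChar := by
      rw [List.reverse_reverse, List.map_map, List.map_map]
      apply List.map_congr_left
      intro d hd
      exact pv_bridge_val d (hdig d hd)
    rw [hmap]
    simp only [Nat.zero_mul, Nat.zero_add]
    rw [Bool.eq_iff_iff, beq_iff_eq, beq_iff_eq]
    have hFlt : ∀ d ∈ ((Nat.digits 10 m).map pvF).reverse, d < 10 := by
      intro d hd
      simp only [List.mem_reverse, List.mem_map] at hd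
      obtain ⟨e, he, rfl⟩ := hd
      exact pvF_lt e (hdig e he)
    constructor
    · intro h
      rw [← List.map_reverse] at h
      have := map_digitChar_inj _ _ (by simpa using hFlt)
        (fun d hd => hdig d (List.mem_reverse.mp hd)) h
      conv_rhs => rw [← Nat.ofDigits_digits 10 m]
      rw [this, List.reverse_reverse]
    · intro h
      conv_rhs at h => rw [← Nat.ofDigits_digits 10 m]
      have := ofDigits_inj _ _ (by simp) hFlt hdig h
      have h2 : (Nat.digits 10 m).map pvF = (Nat.digits 10 m).reverse := by
        conv_lhs => rw [← List.reverse_reverse (List.map pvF (Nat.digits 10 m))]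
        rw [this]
      rw [h2, List.map_reverse]
  · rw [if_neg hf]
    show (if _ then _ else false) = false
    rw [if_neg (by rw [hall]; exact hf)]

-- ===== VERDICT (by name: the statement is the Claim_ definition above) =====
theorem is_upside_down_spec : Claim_equal_is_upside_down := by
  intro n _
  unfold Spec_is_upside_down
  rcases lt_trichotomy n 0 with hneg | hz | hpos
  · -- negative: A scans '-' which is not flippable; B rejects immediately
    unfold is_upside_down is_upside_down_alt
    rw [if_pos hneg]
    rw [show (PySem.Int.toStr n).toList = '-' :: Nat.toDigits 10 n.natAbs by
      simp [PySem.Int.toStr, PySem.Int.toChars, hneg]]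
    rw [pv_A_char]
    rw [if_neg]
    simp only [List.all_cons, Bool.and_eq_true, List.all_eq_true]
    rintro ⟨h, -⟩
    simp [pvFlip] at h
  · subst hz
    have hs : (PySem.Int.toStr (0 : Int)).toList = ['0'] := by
      simp [PySem.Int.toStr, PySem.Int.toChars, Nat.toDigits_zero]
    have hl : pvAltLoop 0 0 = some 0 := by rw [pvAltLoop]; simp
    simp only [is_upside_down, is_upside_down_alt, hs, Int.toNat_zero, hl]
    decide
  · unfold is_upside_down is_upside_down_alt
    rw [if_neg (by omega)]
    have hm : 0 < n.toNat := by omega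
    rw [show (PySem.Int.toStr n).toList = Nat.toDigits 10 n.toNat by
      simp [PySem.Int.toStr, PySem.Int.toChars, not_lt.mpr (le_of_lt hpos)]]
    rw [pv_A_char, toDigits_eq_digits n.toNat hm]
    exact pv_main_pos n.toNat hm
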